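-- pv_equiv track=rewrite | github.com/pypi-data/pypi-mirror-50 | packages/plint/plint-0.1-py3-none-any.whl/plint/rhyme.py | phon_rhyme
-- ===== SOURCE A (Python) =====
-- vowel = list("Eeaio592O#@y%u()$")
--
-- def suffix(x, y):
--     """length of the longest common suffix of x and y"""
--     bound = min(len(x), len(y))
--     for i in range(bound):
--         a = x[-(1 + i)]
--         b = y[-(1 + i)]
--         if a != b:
--             return i
--     return bound
--
-- def phon_rhyme(x, y):
--     """are x and y acceptable phonetic rhymes?"""
--     assert (isinstance(x, str))
--     assert (isinstance(y, str))
--     nphon = suffix(x, y)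
--     for c in x[-nphon:]:
--         if c in vowel:
--             return nphon
--     return 0
-- ===== SOURCE B (Python) =====
-- VOWELS = set("Eeaio592O#@y%u()$")
--
-- def phon_rhyme(x, y):
--     """are x and y acceptable phonetic rhymes?"""
--     count = 0
--     has_vowel = False
--     for a, b in zip(reversed(x), reversed(y)):
--         if a != b:
--             break
--         count += 1
--         if a in VOWELS:
--             has_vowel = True
--     return count if has_vowel else 0
-- ===== Notes on version B (the rewrite author's own statement) =====
-- stated objective: simpler
-- what changed: Single fused backward pass over zip(reversed(x), reversed(y)) with a match count and a vowel flag, replacing A's two-phase design (per-index negative indexing to compute the suffix length, then a rescan of the x[-nphon:] slice against a vowel list).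
import Mathlib
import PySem

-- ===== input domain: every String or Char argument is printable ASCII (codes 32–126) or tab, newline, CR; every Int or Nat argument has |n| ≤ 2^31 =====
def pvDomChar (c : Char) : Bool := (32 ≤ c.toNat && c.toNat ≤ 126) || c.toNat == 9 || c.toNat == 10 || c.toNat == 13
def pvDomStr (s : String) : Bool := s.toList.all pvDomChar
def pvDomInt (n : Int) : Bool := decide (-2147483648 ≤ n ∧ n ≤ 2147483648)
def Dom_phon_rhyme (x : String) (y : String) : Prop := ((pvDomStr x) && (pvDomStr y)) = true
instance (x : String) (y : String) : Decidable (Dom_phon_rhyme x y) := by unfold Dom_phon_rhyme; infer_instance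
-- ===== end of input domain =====

-- B fuses A's two passes (common-suffix length, then a rescan of the x[-nphon:] slice) into one
-- backward loop carrying a count and a vowel flag; objective: simpler (same return value everywhere).

-- ===== PORT A =====
def vowel : List Char := "Eeaio592O#@y%u()$".toList

-- the 'for i in range(bound)' loop of suffix(x, y), with its early return;
-- the indices -(1+i) are always in range here (i < bound ≤ min of the lengths), so .getD is exact
def suffixLoop (xs ys : List Char) (bound i : Nat) : Int :=
  if i < bound then
    let a := (PySem.List.pyGet? xs (-(1 + (i : Int)))).getD ' '
    let b := (PySem.List.pyGet? ys (-(1 + (i : Int)))).getD ' '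
    if a ≠ b then (i : Int) else suffixLoop xs ys bound (i + 1)
  else (bound : Int)
termination_by bound - i

-- the 'for c in x[-nphon:]' loop with its early return
def scanLoop : List Char → Int → Int
  | [], _ => 0
  | c :: cs, n => if c ∈ vowel then n else scanLoop cs n

def phon_rhyme (x : String) (y : String) : Int :=
  let xs := x.toList
  let ys := y.toList
  let nphon := suffixLoop xs ys (min xs.length ys.length) 0
  scanLoop (PySem.List.slice xs (some (-nphon)) none) nphon

-- ===== PORT B =====
def vowelsB : PySem.Set Char := PySem.Set.ofList "Eeaio592O#@y%u()$".toList

-- the fused backward loop of Source B over zip(reversed(x), reversed(y))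
def altLoop (rx ry : List Char) (count : Int) (flag : Bool) : Int :=
  match rx, ry with
  | a :: rx', b :: ry' =>
    if a ≠ b then (if flag then count else 0)
    else altLoop rx' ry' (count + 1) (flag || decide (a ∈ vowelsB))
  | _, _ => if flag then count else 0

def phon_rhyme_alt (x : String) (y : String) : Int :=
  altLoop x.toList.reverse y.toList.reverse 0 false

-- ===== PRECONDITION & SPEC =====
def Spec_phon_rhyme (x : String) (y : String) (out : Int) : Prop := out = phon_rhyme_alt x y
instance (x : String) (y : String) (out : Int) : Decidable (Spec_phon_rhyme x y out) := by unfold Spec_phon_rhyme; infer_instance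

-- ===== CLAIM (what is proved, stated in full; the proofs are below) =====
def Claim_equal_phon_rhyme : Prop := ∀ (x : String) (y : String), Dom_phon_rhyme x y → Spec_phon_rhyme x y (phon_rhyme x y)

-- ===== LEMMAS AND PROOFS =====

-- length of the common prefix of two (here: reversed) lists
def csuf : List Char → List Char → Nat
  | a :: xs, b :: ys => if a = b then csuf xs ys + 1 else 0
  | _, _ => 0

lemma csuf_le_left : ∀ (xs ys : List Char), csuf xs ys ≤ xs.length
  | [], _ => by simp [csuf]
  | _ :: _, [] => by simp [csuf]
  | a :: xs, b :: ys => by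
    simp only [csuf]
    split_ifs
    · simpa using csuf_le_left xs ys
    · simp

lemma csuf_le_right : ∀ (xs ys : List Char), csuf xs ys ≤ ys.length
  | [], _ => by simp [csuf]
  | _ :: _, [] => by simp [csuf]
  | a :: xs, b :: ys => by
    simp only [csuf]
    split_ifs
    · simpa using csuf_le_right xs ys
    · simp

lemma suffixLoop_eq (xs ys : List Char) (i : Nat)
    (h : i ≤ min xs.length ys.length) :
    suffixLoop xs ys (min xs.length ys.length) i
      = (i : Int) + (csuf (xs.reverse.drop i) (ys.reverse.drop i) : Int) := by
  by_cases hlt : i < min xs.length ys.length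
  · have hx : i < xs.length := lt_of_lt_of_le hlt (Nat.min_le_left _ _)
    have hy : i < ys.length := lt_of_lt_of_le hlt (Nat.min_le_right _ _)
    have hxr : i < xs.reverse.length := by simpa using hx
    have hyr : i < ys.reverse.length := by simpa using hy
    have hax : PySem.List.pyGet? xs (-(1 + (i : Int))) = some xs.reverse[i] := by
      have h1 : (0 : Nat) < i + 1 := Nat.succ_pos i
      have h2 : i + 1 ≤ xs.length := hx
      have := PySem.List.pyGet?_neg_natCast xs (i + 1) h1 h2
      have hc : (-(1 + (i : Int))) = -((i + 1 : Nat) : Int) := by push_cast; ring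
      rw [hc, this, List.getElem?_eq_getElem (by omega)]
      congr 1
      rw [List.getElem_reverse]
      congr 1
      omega
    have hay : PySem.List.pyGet? ys (-(1 + (i : Int))) = some ys.reverse[i] := by
      have h1 : (0 : Nat) < i + 1 := Nat.succ_pos i
      have h2 : i + 1 ≤ ys.length := hy
      have := PySem.List.pyGet?_neg_natCast ys (i + 1) h1 h2
      have hc : (-(1 + (i : Int))) = -((i + 1 : Nat) : Int) := by push_cast; ring
      rw [hc, this, List.getElem?_eq_getElem (by omega)]
      congr 1
      rw [List.getElem_reverse]
      congr 1
      omega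
    have hdx : xs.reverse.drop i = xs.reverse[i] :: xs.reverse.drop (i + 1) :=
      (List.getElem_cons_drop (by simpa using hx)).symm
    have hdy : ys.reverse.drop i = ys.reverse[i] :: ys.reverse.drop (i + 1) :=
      (List.getElem_cons_drop (by simpa using hy)).symm
    rw [suffixLoop, if_pos hlt, hax, hay]
    simp only [Option.getD_some]
    by_cases heq : xs.reverse[i] = ys.reverse[i]
    · rw [if_neg (by simp [heq]), suffixLoop_eq xs ys (i + 1) hlt, hdx, hdy,
        csuf, if_pos heq]
      push_cast; ring
    · rw [if_pos (by simpa using heq), hdx, hdy, csuf, if_neg heq]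
      simp
  · have hi : i = min xs.length ys.length := le_antisymm h (le_of_not_gt hlt)
    have hz : csuf (xs.reverse.drop i) (ys.reverse.drop i) = 0 := by
      rcases Nat.le_total xs.length ys.length with hm | hm
      · have : xs.reverse.drop i = [] := by
          apply List.drop_eq_nil_of_le
          simp only [List.length_reverse]; omega
        rw [this]; cases ys.reverse.drop i <;> simp [csuf]
      · have : ys.reverse.drop i = [] := by
          apply List.drop_eq_nil_of_le
          simp only [List.length_reverse]; omega
        rw [this]; cases xs.reverse.drop i <;> simp [csuf]
    rw [suffixLoop, if_neg hlt, hz, hi]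
    simp
termination_by min xs.length ys.length - i

lemma scanLoop_eq (l : List Char) (n : Int) :
    scanLoop l n = if l.any (fun c => decide (c ∈ vowel)) then n else 0 := by
  induction l with
  | nil => simp [scanLoop]
  | cons c cs ih =>
    simp only [scanLoop, List.any_cons, ih]
    by_cases hc : c ∈ vowel <;> simp [hc]

lemma vowelsB_eq : vowelsB = vowel := by decide

lemma altLoop_eq (rx ry : List Char) (c : Int) (flag : Bool) :
    altLoop rx ry c flag
      = if flag || (rx.take (csuf rx ry)).any (fun a => decide (a ∈ vowelsB))
        then c + (csuf rx ry : Int) else 0 := by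
  induction rx generalizing ry c flag with
  | nil => cases ry <;> simp [altLoop, csuf]
  | cons a rx' ih =>
    cases ry with
    | nil => simp [altLoop, csuf]
    | cons b ry' =>
      simp only [altLoop, csuf]
      by_cases heq : a = b
      · rw [if_neg (by simp [heq]), if_pos heq, ih]
        simp only [List.take_succ_cons, List.any_cons, Bool.or_assoc]
        split_ifs with h
        · push_cast; ring
        · rfl
      · rw [if_pos (by simpa using heq), if_neg heq]
        simp

-- ===== VERDICT (by name: the statement is the Claim_ definition above) =====
theorem phon_rhyme_spec : Claim_equal_phon_rhyme := by
  intro x y _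
  show scanLoop
      (PySem.List.slice x.toList
        (some (-(suffixLoop x.toList y.toList (min x.toList.length y.toList.length) 0))) none)
      (suffixLoop x.toList y.toList (min x.toList.length y.toList.length) 0)
    = altLoop x.toList.reverse y.toList.reverse 0 false
  generalize x.toList = xs
  generalize y.toList = ys
  rw [suffixLoop_eq xs ys 0 (Nat.zero_le _)]
  simp only [List.drop_zero, Nat.cast_zero, zero_add]
  rw [altLoop_eq, scanLoop_eq]
  simp only [vowelsB_eq, Bool.false_or]
  have hnx : csuf xs.reverse ys.reverse ≤ xs.length := by
    simpa using csuf_le_left xs.reverse ys.reverse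
  generalize hg : csuf xs.reverse ys.reverse = n at hnx ⊢
  by_cases hz : n = 0
  · subst hz
    simp [PySem.List.slice_none_none]
  · have hpos : 0 < n := Nat.pos_of_ne_zero hz
    have hslice : PySem.List.slice xs (some (-(n : Int))) none
        = xs.drop (xs.length - n) :=
      PySem.List.slice_from_neg_natCast xs n hpos
    rw [hslice]
    have hdrop : xs.drop (xs.length - n) = (xs.reverse.take n).reverse := by
      rw [List.take_reverse, List.reverse_reverse]
    rw [hdrop, List.any_reverse]
    split_ifs <;> simp
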